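-- pv_equiv track=rewrite | github.com/wang502/slack-vc | utils.py | extract_name_from_string
-- ===== SOURCE A (Python) =====
-- def extract_name_from_string(s):
--     i = 0
--     while i <len(s):
--         if s[i] == '\n' or s[i] == ' ' or s[i] == '\t':
--             break
--         else:
--             i += 1
--     return s[:i]
-- ===== SOURCE B (Python) =====
-- def extract_name_from_string(s):
--     cuts = [i for i in (s.find(' '), s.find('\n'), s.find('\t')) if i != -1]
--     return s[:min(cuts)] if cuts else s
-- ===== Notes on version B (the rewrite author's own statement) =====
-- stated objective: idiomatic
-- what changed: Replaces the manual per-character index loop with a break by three str.find calls whose non-(-1) results are minimized to get the cut point, then a single slice.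
import Mathlib
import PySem

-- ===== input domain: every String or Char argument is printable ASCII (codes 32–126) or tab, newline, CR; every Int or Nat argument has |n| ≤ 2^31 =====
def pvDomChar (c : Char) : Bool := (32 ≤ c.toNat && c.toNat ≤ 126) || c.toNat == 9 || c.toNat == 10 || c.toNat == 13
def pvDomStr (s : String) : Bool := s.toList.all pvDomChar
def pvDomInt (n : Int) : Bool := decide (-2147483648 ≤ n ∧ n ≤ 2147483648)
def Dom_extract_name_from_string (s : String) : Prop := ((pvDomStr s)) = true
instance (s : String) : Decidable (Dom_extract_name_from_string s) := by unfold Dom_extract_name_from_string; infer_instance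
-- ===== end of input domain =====

-- B replaces A's manual index loop with three str.find calls minimized to a cut point; idiomatic, same O(n) cost.

-- ===== PORT A =====
-- the while loop of A: advance i until a delimiter or the end; s[i] is exact via l[i] (i < length guard)
def pvALoop (l : List Char) (i : Nat) : Nat :=
  if h : i < l.length then
    if l[i] = '\n' ∨ l[i] = ' ' ∨ l[i] = '\t' then i else pvALoop l (i + 1)
  else i
termination_by l.length - i

def extract_name_from_string (s : String) : String :=
  PySem.Str.slice s none (some (pvALoop s.toList 0 : Int))

-- ===== PORT B =====
def extract_name_from_string_alt (s : String) : String :=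
  let cuts := [PySem.Str.find s " ", PySem.Str.find s "\n", PySem.Str.find s "\t"].filter (· ≠ -1)
  match PySem.List.min? cuts id with
  | some m => PySem.Str.slice s none (some m)
  | none => s

-- ===== PRECONDITION & SPEC =====
def Spec_extract_name_from_string (s : String) (out : String) : Prop := out = extract_name_from_string_alt s
instance (s : String) (out : String) : Decidable (Spec_extract_name_from_string s out) := by unfold Spec_extract_name_from_string; infer_instance

-- ===== CLAIM (what is proved, stated in full; the proofs are below) =====
def Claim_equal_extract_name_from_string : Prop := ∀ (s : String), Dom_extract_name_from_string s → Spec_extract_name_from_string s (extract_name_from_string s)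

-- ===== LEMMAS AND PROOFS =====

-- delimiter test, as B's takeWhile-style predicate (true = keep scanning)
def pvKeep (c : Char) : Bool := !(c == '\n' || c == ' ' || c == '\t')

theorem pvALoop_eq (l : List Char) : ∀ i : Nat, pvALoop l i = i + ((l.drop i).takeWhile pvKeep).length := by
  intro i
  induction hn : l.length - i using Nat.strong_induction_on generalizing i with
  | _ n ih =>
    unfold pvALoop
    split
    · rename_i h
      rw [List.drop_eq_getElem_cons h]
      by_cases hd : l[i] = '\n' ∨ l[i] = ' ' ∨ l[i] = '\t'
      · have : pvKeep l[i] = false := by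
          simp only [pvKeep]
          rcases hd with h1 | h1 | h1 <;> simp [h1]
        simp [hd, this]
      · have hkeep : pvKeep l[i] = true := by
          simp only [pvKeep]
          push Not at hd
          simp [hd.1, hd.2.1, hd.2.2]
        rw [if_neg hd, ih (l.length - (i + 1)) (by omega) (i + 1) rfl,
          List.takeWhile_cons, if_pos hkeep, List.length_cons]
        omega
    · rename_i h
      rw [List.drop_eq_nil_of_le (by omega)]
      simp

theorem pv_tw_get {α : Type} (p : α → Bool) :
    ∀ (l : List α) (j : Nat) (hl : j < l.length), j < (l.takeWhile p).length → p l[j] = true := by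
  intro l
  induction l with
  | nil => intro j hl; simp at hl
  | cons a t ih =>
    intro j hl hj
    by_cases ha : p a = true
    · cases j with
      | zero => simpa using ha
      | succ j =>
        simp only [List.takeWhile_cons, if_pos ha, List.length_cons, Nat.add_lt_add_iff_right] at hj
        simpa using ih j (by simpa using hl) hj
    · rw [List.takeWhile_cons, if_neg ha] at hj
      simp at hj

theorem pv_tw_stop {α : Type} (p : α → Bool) :
    ∀ (l : List α) (h : (l.takeWhile p).length < l.length), p (l[(l.takeWhile p).length]'h) = false := by
  intro l
  induction l with
  | nil => intro h; simp at h
  | cons a t ih =>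
    intro h
    by_cases ha : p a = true
    · simp only [List.takeWhile_cons, if_pos ha, List.length_cons] at h ⊢
      simpa using ih (by omega)
    · simp only [List.takeWhile_cons, if_neg ha, List.length_nil] at h ⊢
      simpa using ha

theorem pv_main (s : String) : extract_name_from_string s = extract_name_from_string_alt s := by
  set l := s.toList with hl
  set k := (l.takeWhile pvKeep).length with hkdef
  have hlen : k ≤ l.length := (List.takeWhile_prefix (l := l) pvKeep).length_le
  have hA : pvALoop l 0 = k := by simpa using pvALoop_eq l 0
  have hge : ∀ c : Char, pvKeep c = false → 0 ≤ PySem.Chars.find l [c] →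
      (k : Int) ≤ PySem.Chars.find l [c] := by
    intro c hc hpos
    obtain ⟨hpre, hmin⟩ := PySem.Chars.find_spec hpos
    by_contra hlt
    push Not at hlt
    have hnk : (PySem.Chars.find l [c]).toNat < k := by omega
    have hnl : (PySem.Chars.find l [c]).toNat < l.length := lt_of_lt_of_le hnk hlen
    obtain ⟨r, hr⟩ := hpre
    rw [List.drop_eq_getElem_cons hnl] at hr
    simp only [List.cons_append, List.nil_append, List.cons.injEq] at hr
    have hq := pv_tw_get pvKeep l _ hnl hnk
    rw [← hr.1, hc] at hq
    simp at hq
  by_cases hkl : k < l.length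
  · -- a delimiter exists; d := l[k] is the first one and min of the finds is k
    set d := l[k] with hd
    have hqd : pvKeep d = false := pv_tw_stop pvKeep l hkl
    have hdin : [d] <:+: l := ⟨l.take k, l.drop (k + 1), by
      rw [show l.take k ++ [d] ++ l.drop (k+1) = l.take k ++ ([d] ++ l.drop (k+1)) by simp,
        show [d] ++ l.drop (k+1) = l.drop k from by rw [List.drop_eq_getElem_cons hkl]; rfl,
        List.take_append_drop]⟩
    have hpos : 0 ≤ PySem.Chars.find l [d] := (PySem.Chars.find_nonneg_iff l [d]).mpr hdin
    have hfd : PySem.Chars.find l [d] = (k : Int) := by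
      have hge' := hge d hqd hpos
      obtain ⟨hpre, hmin⟩ := PySem.Chars.find_spec hpos
      have hk_pre : [d] <+: l.drop k := ⟨l.drop (k + 1), by rw [List.drop_eq_getElem_cons hkl]; rfl⟩
      have hle : ¬ k < (PySem.Chars.find l [d]).toNat := fun h => hmin k h hk_pre
      omega
    have hd3 : d = '\n' ∨ d = ' ' ∨ d = '\t' := by
      simp only [pvKeep, Bool.not_eq_false', Bool.or_eq_true, beq_iff_eq] at hqd
      tauto
    unfold extract_name_from_string extract_name_from_string_alt
    simp only [PySem.Str.find_eq, ← hl]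
    rw [show (" " : String).toList = [' '] from rfl,
      show ("\n" : String).toList = ['\n'] from rfl,
      show ("\t" : String).toList = ['\t'] from rfl]
    set cuts := [PySem.Chars.find l [' '], PySem.Chars.find l ['\n'],
      PySem.Chars.find l ['\t']].filter (· ≠ -1) with hcuts
    have hkne : ((k : Int)) ≠ -1 := by omega
    have hmem : (k : Int) ∈ cuts := by
      rcases hd3 with h | h | h <;> rw [h] at hfd <;>
        simp [hcuts, List.mem_filter, ← hfd] <;> omega
    have hlb : ∀ x ∈ cuts, (k : Int) ≤ x := by
      intro x hx
      obtain ⟨hxin, hxne⟩ := List.mem_filter.mp hx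
      have hxne' : x ≠ -1 := by simpa using hxne
      simp only [List.mem_cons, List.not_mem_nil, or_false] at hxin
      rcases hxin with h | h | h <;> subst h
      · exact hge ' ' (by decide) (by have h9 := PySem.Chars.neg_one_le_find l [' ']; omega)
      · exact hge '\n' (by decide) (by have h9 := PySem.Chars.neg_one_le_find l ['\n']; omega)
      · exact hge '\t' (by decide) (by have h9 := PySem.Chars.neg_one_le_find l ['\t']; omega)
    obtain ⟨m, hm⟩ : ∃ m, PySem.List.min? cuts id = some m := by
      cases h : PySem.List.min? cuts id with
      | none => rw [PySem.List.min?_eq_none_iff] at h; rw [h] at hmem; simp at hmem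
      | some m => exact ⟨m, rfl⟩
    rw [hm]
    have h1 : (k : Int) ≤ m := hlb m (PySem.List.min?_mem hm)
    have h2 : m ≤ (k : Int) := by simpa using PySem.List.min?_isMin hm (k : Int) hmem
    rw [hA, le_antisymm h2 h1]
  · -- no delimiter: every find is -1 and both sides return s whole
    have hkeq : k = l.length := by omega
    have hall : ∀ c ∈ l, pvKeep c = true := by
      intro c hcmem
      obtain ⟨j, hj, hjc⟩ := List.mem_iff_getElem.mp hcmem
      rw [← hjc]
      exact pv_tw_get pvKeep l j hj (by omega)
    have hnot : ∀ c : Char, pvKeep c = false → PySem.Chars.find l [c] = -1 := by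
      intro c hc
      rw [PySem.Chars.find_eq_neg_one_iff]
      intro hinf
      have hcl : c ∈ l := hinf.sublist.subset (by simp)
      rw [hall c hcl] at hc
      simp at hc
    have hsl : PySem.Str.slice s none (some ((l.length : Nat) : Int)) = s := by
      apply String.toList_injective
      rw [PySem.Str.toList_slice, PySem.Chars.slice_eq_listSlice, PySem.List.slice_to_natCast]
      simp [← hl]
    unfold extract_name_from_string extract_name_from_string_alt
    simp only [PySem.Str.find_eq, ← hl]
    rw [show (" " : String).toList = [' '] from rfl,
      show ("\n" : String).toList = ['\n'] from rfl,
      show ("\t" : String).toList = ['\t'] from rfl,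
      hnot ' ' (by decide), hnot '\n' (by decide), hnot '\t' (by decide), hA, hkeq]
    exact hsl

-- ===== VERDICT (by name: the statement is the Claim_ definition above) =====
theorem extract_name_from_string_spec : Claim_equal_extract_name_from_string := by
  intro s _
  unfold Spec_extract_name_from_string
  exact pv_main s
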